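-- pv_equiv track=rewrite | github.com/Bustosusc/lenguajesprog | parcial1.py | numeros
-- ===== SOURCE A (Python) =====
-- def numeros (n,x):
--     isprime = []
--     for i in range(0,n,1):
--         if i == 0 or i == 1:
--             isprime.append(0)
--         else:
--             isprime.append(i)
--     return isprime
-- ===== SOURCE B (Python) =====
-- def numeros(n, x):
--     # Build the result back-to-front: descend from n-1 appending the indices >= 2,
--     # then append zeros for the remaining slots, and reverse at the end.
--     out = []
--     i = n - 1
--     while i >= 2:
--         out.append(i)
--         i -= 1
--     while i >= 0:
--         out.append(0)
--         i -= 1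
--     return out[::-1]
-- ===== Notes on version B (the rewrite author's own statement) =====
-- stated objective: alternative
-- what changed: Replaces A's single forward loop with a per-element branch by a back-to-front construction: one countdown loop appends the indices n-1..2, a second loop appends the zeros, and the list is reversed at the end.
import Mathlib
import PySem

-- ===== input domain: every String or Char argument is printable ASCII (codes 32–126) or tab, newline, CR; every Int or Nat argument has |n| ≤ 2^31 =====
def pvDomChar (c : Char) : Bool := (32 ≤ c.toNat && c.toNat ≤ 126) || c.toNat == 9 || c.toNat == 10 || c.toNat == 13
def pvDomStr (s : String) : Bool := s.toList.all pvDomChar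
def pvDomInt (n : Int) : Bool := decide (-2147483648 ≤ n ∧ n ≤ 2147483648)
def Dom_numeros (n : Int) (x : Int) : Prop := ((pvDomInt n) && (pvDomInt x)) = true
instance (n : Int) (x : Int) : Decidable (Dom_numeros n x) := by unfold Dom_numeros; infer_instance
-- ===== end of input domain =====

-- B builds the list back-to-front: a countdown loop emits the indices n-1..2, a second
-- loop emits the zeros, and the accumulator is reversed at the end (objective: alternative).


-- ===== PORT A =====
def numeros (n : Int) (x : Int) : List Int :=
  (PySem.List.pyRange 0 n 1).foldl
    (fun isprime i => if i == 0 || i == 1 then isprime ++ [0] else isprime ++ [i]) []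

-- ===== PORT B =====
-- second while loop: while i >= 0: out.append(0); i -= 1
def bZeros (i : Int) (out : List Int) : List Int :=
  if 0 ≤ i then bZeros (i - 1) (out ++ [0]) else out
termination_by (i + 1).toNat
decreasing_by omega

-- first while loop: while i >= 2: out.append(i); i -= 1, then falls through to the second
def bDesc (i : Int) (out : List Int) : List Int :=
  if 2 ≤ i then bDesc (i - 1) (out ++ [i]) else bZeros i out
termination_by (i + 1).toNat
decreasing_by omega

def numeros_alt (n : Int) (x : Int) : List Int :=
  (bDesc (n - 1) []).reverse   -- out[::-1]

-- ===== PRECONDITION & SPEC =====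
def Spec_numeros (n : Int) (x : Int) (out : List Int) : Prop := out = numeros_alt n x
instance (n : Int) (x : Int) (out : List Int) : Decidable (Spec_numeros n x out) := by unfold Spec_numeros; infer_instance

-- ===== CLAIM (what is proved, stated in full; the proofs are below) =====
def Claim_equal_numeros : Prop := ∀ (n : Int) (x : Int), Dom_numeros n x → Spec_numeros n x (numeros n x)

-- ===== LEMMAS AND PROOFS =====
theorem bZeros_eq (i : Int) (out : List Int) :
    bZeros i out = out ++ List.replicate (i + 1).toNat 0 := by
  induction i, out using bZeros.induct with
  | case1 i out h ih =>
    rw [bZeros, if_pos h, ih]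
    have : (i + 1).toNat = (i - 1 + 1).toNat + 1 := by omega
    rw [this, List.replicate_succ, List.append_assoc]
    rfl
  | case2 i out h =>
    rw [bZeros, if_neg h]
    have : (i + 1).toNat = 0 := by omega
    simp [this]

theorem bDesc_eq (i : Int) (out : List Int) :
    bDesc i out = out ++ (PySem.List.pyRange 2 (i + 1) 1).reverse
      ++ List.replicate (min (i + 1) 2).toNat 0 := by
  induction i, out using bDesc.induct with
  | case1 i out h ih =>
    rw [bDesc, if_pos h, ih]
    have hr : PySem.List.pyRange 2 (i - 1 + 1 + 1) 1
        = PySem.List.pyRange 2 (i - 1 + 1) 1 ++ [i - 1 + 1] :=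
      PySem.List.pyRange_one_succ_right (by omega)
    have he : i - 1 + 1 + 1 = i + 1 := by omega
    have he2 : i - 1 + 1 = i := by omega
    rw [he, he2] at hr
    have hmin : min (i - 1 + 1) 2 = min (i + 1) 2 := by omega
    rw [hr, hmin, List.reverse_append]
    simp [List.append_assoc]
  | case2 i out h =>
    rw [bDesc, if_neg h, bZeros_eq]
    have hnil : PySem.List.pyRange 2 (i + 1) 1 = [] :=
      PySem.List.pyRange_one_eq_nil (by omega)
    have hmin : min (i + 1) 2 = i + 1 := by omega
    rw [hnil, hmin]
    simp

theorem numeros_key (m : Nat) :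
    (PySem.List.pyRange 0 (m : Int) 1).foldl
      (fun isprime i => if i == 0 || i == 1 then isprime ++ [0] else isprime ++ [i]) []
    = List.replicate (min (m : Int) 2).toNat 0 ++ PySem.List.pyRange 2 (m : Int) 1 := by
  induction m with
  | zero => simp [PySem.List.pyRange_one_eq_nil]
  | succ k ih =>
    have hk0 : (0:Int) ≤ (k:Int) := Int.natCast_nonneg k
    have hr : PySem.List.pyRange 0 ((k:Int) + 1) 1
        = PySem.List.pyRange 0 (k : Int) 1 ++ [(k : Int)] :=
      PySem.List.pyRange_one_succ_right hk0
    push_cast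
    rw [hr, List.foldl_append, ih]
    simp only [List.foldl_cons, List.foldl_nil]
    match k with
    | 0 => decide
    | 1 => decide
    | (j+2) =>
      push_cast at ih hr ⊢
      have hne : ¬ ((((j:Int)+2) == 0 || ((j:Int)+2) == 1) = true) := by
        simp; omega
      rw [if_neg hne]
      have hr2 : PySem.List.pyRange 2 ((j:Int) + 2 + 1) 1
          = PySem.List.pyRange 2 ((j:Int) + 2) 1 ++ [(j:Int) + 2] :=
        PySem.List.pyRange_one_succ_right (by omega)
      have hm1 : min ((j:Int) + 2 + 1) 2 = 2 := by omega
      have hm2 : min ((j:Int) + 2) 2 = 2 := by omega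
      rw [hr2, hm1, hm2, List.append_assoc]

-- ===== VERDICT (by name: the statement is the Claim_ definition above) =====
theorem numeros_spec : Claim_equal_numeros := by
  intro n x _
  unfold Spec_numeros numeros numeros_alt
  rw [bDesc_eq]
  have he : n - 1 + 1 = n := by omega
  rw [he]
  simp only [List.nil_append, List.reverse_append, List.reverse_reverse,
    List.reverse_replicate]
  by_cases h : n ≤ 0
  · have h1 : PySem.List.pyRange 0 n 1 = [] := PySem.List.pyRange_one_eq_nil h
    have h2 : PySem.List.pyRange 2 n 1 = [] := PySem.List.pyRange_one_eq_nil (by omega)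
    have h3 : (min n 2).toNat = 0 := by omega
    simp [h1, h2, h3]
  · have hn : n = (n.toNat : Int) := by omega
    rw [hn]
    exact numeros_key n.toNat
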